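-- pv_equiv track=rewrite | github.com/pypi-data/pypi-mirror-136 | packages/minetext/minetext-0.0.3-py2-none-any.whl/minetext/count_txt.py | count_words_txt
-- ===== SOURCE A (Python) =====
-- def count_words_txt(text):
--     """
--     Count amount of words.
--     :param text: input is text data
--     :return: Total number of words
--     """
--
--     # Define punctuation symbols and numbers.
--     punctnum = '''!()-[]{};:'"\,<>./?@#$%^&*_~\n0123456789'''
--     textNew = ""
--
--     # Store any elements from text in textNew except for punctuation symbols and numbers.
--     for i in text:
--         if i not in punctnum:
--             textNew = textNew + i
--
--     # Split text into words and count these words.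
--     lentext = len(textNew.split())
--     return lentext
-- ===== SOURCE B (Python) =====
-- def count_words_txt(text):
--     punctnum = '''!()-[]{};:'"\,<>./?@#$%^&*_~\n0123456789'''
--     count = 0
--     in_word = False
--     for ch in text:
--         if ch in punctnum:
--             continue
--         if ch.isspace():
--             in_word = False
--         elif not in_word:
--             count += 1
--             in_word = True
--     return count
-- ===== Notes on version B (the rewrite author's own statement) =====
-- stated objective: alternative
-- what changed: Single left-to-right pass counting word-start transitions with an in_word flag, instead of building a filtered copy of the text and counting the pieces of split().
import Mathlib
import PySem

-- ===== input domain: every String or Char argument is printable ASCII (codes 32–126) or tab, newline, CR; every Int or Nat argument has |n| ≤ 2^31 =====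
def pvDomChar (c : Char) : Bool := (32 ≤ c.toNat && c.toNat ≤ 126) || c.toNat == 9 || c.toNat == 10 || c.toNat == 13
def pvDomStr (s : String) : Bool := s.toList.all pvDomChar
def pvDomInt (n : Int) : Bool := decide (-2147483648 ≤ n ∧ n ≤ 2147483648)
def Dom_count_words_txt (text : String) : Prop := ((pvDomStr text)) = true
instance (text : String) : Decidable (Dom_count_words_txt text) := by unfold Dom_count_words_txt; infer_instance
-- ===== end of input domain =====

-- B replaces A's filtered-copy-then-split() with a single pass counting word-start transitions with an in_word flag.


-- ===== PORT A =====
-- punctnum = '''!()-[]{};:'"\,<>./?@#$%^&*_~\n0123456789'''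
def pvPunctnum : List Char := "!()-[]{};:'\"\\,<>./?@#$%^&*_~\n0123456789".toList

def count_words_txt (text : String) : Int :=
  -- for i in text: if i not in punctnum: textNew = textNew + i
  let textNew : List Char :=
    text.toList.foldl (fun acc c => if pvPunctnum.contains c = false then acc ++ [c] else acc) []
  -- len(textNew.split())
  ((PySem.Chars.split₀ textNew).length : Int)

-- ===== PORT B =====
def count_words_txt_alt (text : String) : Int :=
  (text.toList.foldl
    (fun (st : Int × Bool) ch =>
      if pvPunctnum.contains ch then st
      else if PySem.Chars.isspace ch then (st.1, false)
      else if st.2 then st else (st.1 + 1, true))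
    (0, false)).1

-- ===== PRECONDITION & SPEC =====
def Spec_count_words_txt (text : String) (out : Int) : Prop := out = count_words_txt_alt text
instance (text : String) (out : Int) : Decidable (Spec_count_words_txt text out) := by unfold Spec_count_words_txt; infer_instance

-- ===== CLAIM (what is proved, stated in full; the proofs are below) =====
def Claim_equal_count_words_txt : Prop := ∀ (text : String), Dom_count_words_txt text → Spec_count_words_txt text (count_words_txt text)

-- ===== LEMMAS AND PROOFS =====

-- word count of l given whether a word is currently open (each word counted when it closes)
def pvW : List Char → Bool → Nat
  | [], inw => if inw then 1 else 0
  | c :: rest, inw =>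
      if PySem.Chars.isspace c then (if inw then 1 else 0) + pvW rest false
      else pvW rest true

theorem pvGo_length (l : List Char) : ∀ (cur : List Char) (acc : List (List Char)),
    (PySem.Chars.split₀.go l cur acc).length = acc.length + pvW l (!cur.isEmpty) := by
  induction l with
  | nil =>
      intro cur acc
      simp only [PySem.Chars.split₀.go, pvW]
      cases h : cur.isEmpty <;> simp [h]
  | cons c rest ih =>
      intro cur acc
      simp only [PySem.Chars.split₀.go, pvW]
      by_cases hs : PySem.Chars.isspace c
      · cases h : cur.isEmpty <;> simp [hs, h, ih] <;> omega
      · simp [hs, ih]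

theorem pvFoldFilter (l : List Char) : ∀ (acc : List Char),
    l.foldl (fun acc c => if pvPunctnum.contains c = false then acc ++ [c] else acc) acc
      = acc ++ l.filter (fun c => !pvPunctnum.contains c) := by
  induction l with
  | nil => simp
  | cons c rest ih =>
      intro acc
      simp only [List.foldl_cons, List.filter_cons]
      by_cases h : pvPunctnum.contains c
      · simp only [h, ih]
        simp
      · simp only [Bool.not_eq_true] at h
        simp only [h, Bool.not_false, Bool.false_eq_true, if_false, if_true, ih,
          List.append_assoc, List.singleton_append]

theorem pvFoldB (l : List Char) : ∀ (st : Int × Bool),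
    (l.foldl
      (fun (st : Int × Bool) ch =>
        if pvPunctnum.contains ch then st
        else if PySem.Chars.isspace ch then (st.1, false)
        else if st.2 then st else (st.1 + 1, true)) st).1
      = st.1 + (pvW (l.filter (fun c => !pvPunctnum.contains c)) st.2 : Int)
        - (if st.2 then 1 else 0) := by
  induction l with
  | nil =>
      intro st
      cases h : st.2 <;> simp only [List.foldl_nil, List.filter_nil, pvW, h] <;> simp
  | cons c rest ih =>
      intro st
      simp only [List.foldl_cons, List.filter_cons]
      by_cases hp : pvPunctnum.contains c
      · simp only [hp, if_true, Bool.not_true, Bool.false_eq_true, if_false, ih]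
      · by_cases hs : PySem.Chars.isspace c
        · cases h : st.2 <;>
            simp only [hp, hs, h, Bool.not_false, if_true, Bool.false_eq_true, if_false,
              Bool.true_eq_false, ih, pvW] <;> push_cast <;> omega
        · cases h : st.2 <;>
            simp only [hp, hs, h, Bool.not_false, if_true, Bool.false_eq_true, if_false,
              Bool.true_eq_false, ih, pvW] <;> push_cast <;> omega

-- ===== VERDICT (by name: the statement is the Claim_ definition above) =====
theorem count_words_txt_spec : Claim_equal_count_words_txt := by
  intro text _
  unfold Spec_count_words_txt count_words_txt count_words_txt_alt PySem.Chars.split₀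
  simp only [pvFoldFilter, pvFoldB, List.nil_append, pvGo_length]
  simp
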